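-- pv_equiv track=rewrite | github.com/jacobe90/birdflow_mixture_of_products | mixture_of_products_model_training_gaussian.py | get_index_in_bigger_grid
-- ===== SOURCE A (Python) =====
-- def get_index_in_bigger_grid(cell, mask):
--     true_count = -1
--     new_cell = None
--     for i, b in enumerate(mask):
--         if b:
--             true_count += 1
--         if true_count == cell:
--             new_cell = i
--             break
--     return new_cell
-- ===== SOURCE B (Python) =====
-- def get_index_in_bigger_grid(cell, mask):
--     prefix = []
--     c = 0
--     for b in mask:
--         c += 1 if b else 0
--         prefix.append(c)
--     try:
--         return prefix.index(cell + 1)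
--     except ValueError:
--         return None
-- ===== Notes on version B (the rewrite author's own statement) =====
-- stated objective: alternative
-- what changed: Replaces the early-exit enumerate scan with counter state by a cumulative-count table built first and a single prefix.index(cell+1) lookup; the +1 absorbs A's true_count=-1 start.
import Mathlib
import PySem

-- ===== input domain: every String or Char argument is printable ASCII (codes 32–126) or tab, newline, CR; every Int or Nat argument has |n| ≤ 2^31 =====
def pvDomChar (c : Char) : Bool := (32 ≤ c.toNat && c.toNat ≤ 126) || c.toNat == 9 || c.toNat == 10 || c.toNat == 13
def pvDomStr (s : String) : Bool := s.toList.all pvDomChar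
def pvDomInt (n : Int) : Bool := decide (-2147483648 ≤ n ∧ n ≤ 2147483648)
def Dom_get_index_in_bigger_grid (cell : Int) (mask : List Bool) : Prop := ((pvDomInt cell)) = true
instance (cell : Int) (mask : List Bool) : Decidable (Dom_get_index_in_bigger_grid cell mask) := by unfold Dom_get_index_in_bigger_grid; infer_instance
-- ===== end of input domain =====

-- B replaces A's early-exit scan with running counter state by a cumulative-count table plus a single list.index lookup (objective: alternative, same cost).

-- ===== PORT A =====
-- the for-loop with enumerate, running true_count and break, as structural recursion
def pvLoopA (cell : Int) : List Bool → Int → Int → Option Int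
  | [], _, _ => none
  | b :: rest, i, tc =>
    let tc' := if b then tc + 1 else tc
    if tc' = cell then some i else pvLoopA cell rest (i + 1) tc'

def get_index_in_bigger_grid (cell : Int) (mask : List Bool) : Option Int :=
  pvLoopA cell mask 0 (-1)

-- ===== PORT B =====
-- the loop building the cumulative-count list `prefix`
def pvPrefix : List Bool → Int → List Int
  | [], _ => []
  | b :: rest, c =>
    let c' := c + (if b then 1 else 0)
    c' :: pvPrefix rest c'

def get_index_in_bigger_grid_alt (cell : Int) (mask : List Bool) : Option Int :=
  match PySem.List.index? (pvPrefix mask 0) (cell + 1) with   -- prefix.index(cell+1); ValueError → None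
  | some j => some (j : Int)
  | none => none

-- ===== PRECONDITION & SPEC =====
def Spec_get_index_in_bigger_grid (cell : Int) (mask : List Bool) (out : Option Int) : Prop := out = get_index_in_bigger_grid_alt cell mask
instance (cell : Int) (mask : List Bool) (out : Option Int) : Decidable (Spec_get_index_in_bigger_grid cell mask out) := by unfold Spec_get_index_in_bigger_grid; infer_instance

-- ===== CLAIM (what is proved, stated in full; the proofs are below) =====
def Claim_equal_get_index_in_bigger_grid : Prop := ∀ (cell : Int) (mask : List Bool), Dom_get_index_in_bigger_grid cell mask → Spec_get_index_in_bigger_grid cell mask (get_index_in_bigger_grid cell mask)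

-- ===== LEMMAS AND PROOFS =====

-- A's scan with counter tc = c - 1 equals looking up cell+1 in the cumulative counts started at c, offset by i.
theorem pvLoopA_eq_index (cell : Int) : ∀ (mask : List Bool) (c : Int) (i : Int),
    pvLoopA cell mask i (c - 1)
      = (PySem.List.index? (pvPrefix mask c) (cell + 1)).map (fun j => i + (j : Int)) := by
  intro mask
  induction mask with
  | nil => intro c i; simp [pvLoopA, pvPrefix]
  | cons b rest ih =>
    intro c i
    have hstep : (if b then c - 1 + 1 else c - 1) = (c + (if b then 1 else 0)) - 1 := by
      split <;> ring
    simp only [pvLoopA, pvPrefix, hstep]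
    by_cases h : (c + (if b then 1 else 0)) - 1 = cell
    · have h2 : c + (if b then 1 else 0) = cell + 1 := by omega
      rw [if_pos h, h2, PySem.List.index?_cons_self]
      simp
    · have h2 : c + (if b then 1 else 0) ≠ cell + 1 := by omega
      rw [if_neg h, PySem.List.index?_cons_of_ne _ h2, ih (c + (if b then 1 else 0)) (i + 1)]
      cases hx : PySem.List.index? (pvPrefix rest (c + (if b then 1 else 0))) (cell + 1) with
      | none => simp [hx]
      | some j =>
        simp [hx]
        ring

-- ===== VERDICT (by name: the statement is the Claim_ definition above) =====
theorem get_index_in_bigger_grid_spec : Claim_equal_get_index_in_bigger_grid := by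
  intro cell mask _
  unfold Spec_get_index_in_bigger_grid get_index_in_bigger_grid get_index_in_bigger_grid_alt
  have h := pvLoopA_eq_index cell mask 0 0
  norm_num at h
  rw [h]
  simp only [PySem.List.index?_eq_idxOf?]
  cases hx : List.idxOf? (cell + 1) (pvPrefix mask 0) <;> simp [hx]
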